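-- pv_equiv track=rewrite | github.com/Maha-Kefi12/Chorus | spring-ftl/src/main/resources/scripts/Impl.py | generate_java_class
-- ===== SOURCE A (Python) =====
-- from typing import List
--
-- NATURE_TO_JAVA = {
--     'checkbox': 'Boolean',
--     'date': 'Date',
--     'lov': 'String',
--     'dualfield': 'List<String>',
--     'string': 'String',
-- }
--
-- def to_camel_case(s):
--     # Converts snake_case or lower_case to CamelCase for method names
--     parts = s.split('_')
--     return ''.join(word.capitalize() for word in parts)
--
-- def get_java_type(nature):
--     return NATURE_TO_JAVA.get(nature, 'String')
--
-- def generate_java_class(function_id: str, fields: List[dict]) -> str: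
--     class_name = f"{function_id}IRAPImpl"
--     interface_name = f"{function_id}IRAP"
--     package = f"com.linedata.chorus.std.entity.{function_id}IRAP.impl"
--     interface_package = f"com.linedata.chorus.std.entity.{function_id}IRAP.{interface_name}"
--
--     # Collect imports
--     imports = set([interface_package])
--     if any(get_java_type(f['nature']) == 'Date' for f in fields):
--         imports.add('java.util.Date')
--     if any(get_java_type(f['nature']) == 'List<String>' for f in fields):
--         imports.add('java.util.List')
--
--     imports_str = '\n'.join(f'import {imp};' for imp in sorted(imports))
--
--     # Fields
--     fields_str = ''
--     for f in fields:
--         java_type = get_java_type(f['nature'])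
--         fields_str += f"    private {java_type} {f['id']};\n"
--
--     # Getters and setters
--     methods_str = ''
--     for f in fields:
--         java_type = get_java_type(f['nature'])
--         field_id = f['id']
--         camel = to_camel_case(field_id)
--         methods_str += f"    @Override\n"
--         methods_str += f"    public {java_type} get{camel}() {{ return {field_id}; }}\n"
--         methods_str += f"    @Override\n"
--         methods_str += f"    public void set{camel}({java_type} {field_id}) {{ this.{field_id} = {field_id}; }}\n\n"
--
--     # Full class
--     return f'''package {package};\n\n{imports_str}\n\npublic class {class_name} implements {interface_name}\n{{\n{fields_str}\n{methods_str}}}\n'''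
-- ===== SOURCE B (Python) =====
-- from typing import List
--
-- NATURE_TO_JAVA = {
--     'checkbox': 'Boolean',
--     'date': 'Date',
--     'lov': 'String',
--     'dualfield': 'List<String>',
--     'string': 'String',
-- }
--
-- def to_camel_case(s):
--     parts = s.split('_')
--     return ''.join(word.capitalize() for word in parts)
--
-- def get_java_type(nature):
--     return NATURE_TO_JAVA.get(nature, 'String')
--
-- def generate_java_class(function_id: str, fields: List[dict]) -> str:
--     class_name = f"{function_id}IRAPImpl"
--     interface_name = f"{function_id}IRAP"
--     package = f"com.linedata.chorus.std.entity.{function_id}IRAP.impl"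
--     interface_package = f"com.linedata.chorus.std.entity.{function_id}IRAP.{interface_name}"
--
--     # One pass over fields: flags for the imports, and both text buffers.
--     needs_date = False
--     needs_list = False
--     fields_str = ''
--     methods_str = ''
--     for f in fields:
--         java_type = get_java_type(f['nature'])
--         field_id = f['id']
--         if java_type == 'Date':
--             needs_date = True
--         if java_type == 'List<String>':
--             needs_list = True
--         fields_str += f"    private {java_type} {field_id};\n"
--         camel = to_camel_case(field_id)
--         methods_str += (f"    @Override\n"
--                         f"    public {java_type} get{camel}() {{ return {field_id}; }}\n"
--                         f"    @Override\n"
--                         f"    public void set{camel}({java_type} {field_id}) {{ this.{field_id} = {field_id}; }}\n\n")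
--
--     imports = [interface_package] \
--         + (['java.util.Date'] if needs_date else []) \
--         + (['java.util.List'] if needs_list else [])
--     imports_str = '\n'.join(f'import {imp};' for imp in sorted(imports))
--
--     return f'''package {package};\n\n{imports_str}\n\npublic class {class_name} implements {interface_name}\n{{\n{fields_str}\n{methods_str}}}\n'''
-- ===== Notes on version B (the rewrite author's own statement) =====
-- stated objective: simpler
-- what changed: B makes a single pass over fields (computing the needs_date/needs_list flags and both the field and method text buffers in one loop) and assembles the import list directly from the flags, replacing A's two any()-scans, two separate loops and the intermediate set.
import Mathlib
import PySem

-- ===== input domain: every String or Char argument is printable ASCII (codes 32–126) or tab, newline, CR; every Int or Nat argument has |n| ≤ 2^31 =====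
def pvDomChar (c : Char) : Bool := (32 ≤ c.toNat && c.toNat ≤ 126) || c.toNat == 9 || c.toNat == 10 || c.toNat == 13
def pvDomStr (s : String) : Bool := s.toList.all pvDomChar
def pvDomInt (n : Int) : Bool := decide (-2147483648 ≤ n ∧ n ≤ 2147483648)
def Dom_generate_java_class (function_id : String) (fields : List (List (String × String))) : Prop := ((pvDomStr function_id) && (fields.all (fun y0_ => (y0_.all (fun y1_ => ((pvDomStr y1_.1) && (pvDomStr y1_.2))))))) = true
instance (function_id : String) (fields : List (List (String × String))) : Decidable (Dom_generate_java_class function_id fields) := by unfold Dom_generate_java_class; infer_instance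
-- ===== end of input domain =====

-- B makes a single pass over `fields` (flags + both text buffers in one loop) and builds the
-- import list directly instead of A's two any()-scans, two further loops and a set; same output.

-- ===== PORT A =====
-- shared module-level helpers of both Pythons (NATURE_TO_JAVA / get_java_type / to_camel_case)
def getJavaType (nature : String) : String :=
  (PySem.Dict.mk [("checkbox", "Boolean"), ("date", "Date"), ("lov", "String"),
                  ("dualfield", "List<String>"), ("string", "String")]).getD nature "String"

-- word.capitalize(): first char upper-cased, the rest lower-cased (exact on ASCII)
def capitalizeChars : List Char → List Char
  | [] => []
  | c :: t => PySem.Chars.upperChar c :: PySem.Chars.lower t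

def to_camel_case (s : String) : String :=
  PySem.Str.join "" (((PySem.Str.split? s "_").getD []).map (fun w => String.ofList (capitalizeChars w.toList)))

-- f['nature'] / f['id']: KeyError (= get? none) is excluded by Pre_; total form with default ""
def fieldGet (f : List (String × String)) (k : String) : String :=
  ((PySem.Dict.mk f).get? k).getD ""

-- the literal text pieces of the f-strings (identical text in both Pythons)
def privLine (java_type field_id : String) : String :=
  "    private " ++ java_type ++ " " ++ field_id ++ ";\n"

def methLines (java_type field_id camel : String) : String :=
  "    @Override\n" ++
  "    public " ++ java_type ++ " get" ++ camel ++ "() { return " ++ field_id ++ "; }\n" ++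
  "    @Override\n" ++
  "    public void set" ++ camel ++ "(" ++ java_type ++ " " ++ field_id ++ ") { this." ++ field_id ++ " = " ++ field_id ++ "; }\n\n"

def generate_java_class (function_id : String) (fields : List (List (String × String))) : String :=
  let class_name := function_id ++ "IRAPImpl"
  let interface_name := function_id ++ "IRAP"
  let package := "com.linedata.chorus.std.entity." ++ function_id ++ "IRAP.impl"
  let interface_package := "com.linedata.chorus.std.entity." ++ function_id ++ "IRAP." ++ interface_name
  let imports : PySem.Set String := PySem.Set.ofList [interface_package]
  let imports := if fields.any (fun f => getJavaType (fieldGet f "nature") == "Date") then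
      PySem.Set.add imports "java.util.Date" else imports
  let imports := if fields.any (fun f => getJavaType (fieldGet f "nature") == "List<String>") then
      PySem.Set.add imports "java.util.List" else imports
  let imports_str := PySem.Str.join "\n"
      ((PySem.List.sorted imports (fun x => x) false).map (fun imp => "import " ++ imp ++ ";"))
  let fields_str := fields.foldl (fun acc f =>
      acc ++ privLine (getJavaType (fieldGet f "nature")) (fieldGet f "id")) ""
  let methods_str := fields.foldl (fun acc f =>
      let java_type := getJavaType (fieldGet f "nature")
      let field_id := fieldGet f "id"
      let camel := to_camel_case field_id
      acc ++ methLines java_type field_id camel) ""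
  "package " ++ package ++ ";\n\n" ++ imports_str ++ "\n\npublic class " ++ class_name ++
    " implements " ++ interface_name ++ "\n{\n" ++ fields_str ++ "\n" ++ methods_str ++ "}\n"

-- ===== PORT B =====
def generate_java_class_alt (function_id : String) (fields : List (List (String × String))) : String :=
  let class_name := function_id ++ "IRAPImpl"
  let interface_name := function_id ++ "IRAP"
  let package := "com.linedata.chorus.std.entity." ++ function_id ++ "IRAP.impl"
  let interface_package := "com.linedata.chorus.std.entity." ++ function_id ++ "IRAP." ++ interface_name
  -- one pass: (needs_date, needs_list, fields_str, methods_str)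
  let st := fields.foldl (fun (st : Bool × Bool × String × String) f =>
      let java_type := getJavaType (fieldGet f "nature")
      let field_id := fieldGet f "id"
      let camel := to_camel_case field_id
      ((if java_type == "Date" then true else st.1),
       (if java_type == "List<String>" then true else st.2.1),
       st.2.2.1 ++ privLine java_type field_id,
       st.2.2.2 ++ methLines java_type field_id camel))
    (false, false, "", "")
  let imports := [interface_package] ++
      (if st.1 then ["java.util.Date"] else []) ++ (if st.2.1 then ["java.util.List"] else [])
  let imports_str := PySem.Str.join "\n"
      ((PySem.List.sorted imports (fun x => x) false).map (fun imp => "import " ++ imp ++ ";"))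
  "package " ++ package ++ ";\n\n" ++ imports_str ++ "\n\npublic class " ++ class_name ++
    " implements " ++ interface_name ++ "\n{\n" ++ st.2.2.1 ++ "\n" ++ st.2.2.2 ++ "}\n"

-- ===== PRECONDITION & SPEC =====
-- Pre_ excludes only inputs where Python A raises KeyError: a field dict without a 'nature' or 'id' key.
def Pre_generate_java_class (function_id : String) (fields : List (List (String × String))) : Prop :=
  ∀ f ∈ fields, (PySem.Dict.mk f).contains "nature" = true ∧ (PySem.Dict.mk f).contains "id" = true

instance (function_id : String) (fields : List (List (String × String))) : Decidable (Pre_generate_java_class function_id fields) := by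
  unfold Pre_generate_java_class; infer_instance

def pvWitness_generate_java_class : String × (List (List (String × String))) :=
  ("Foo", [[("nature", "date"), ("id", "start_date")], [("nature", "lov"), ("id", "code")]])

def Spec_generate_java_class (function_id : String) (fields : List (List (String × String))) (out : String) : Prop := out = generate_java_class_alt function_id fields
instance (function_id : String) (fields : List (List (String × String))) (out : String) : Decidable (Spec_generate_java_class function_id fields out) := by unfold Spec_generate_java_class; infer_instance

-- ===== CLAIM (what is proved, stated in full; the proofs are below) =====
def Claim_equal_generate_java_class : Prop := ∀ (function_id : String) (fields : List (List (String × String))), Dom_generate_java_class function_id fields → Pre_generate_java_class function_id fields → Spec_generate_java_class function_id fields (generate_java_class function_id fields)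

-- ===== LEMMAS AND PROOFS =====

-- the combined fold of B computes A's two any-scans and A's two separate folds
theorem combined_fold (fields : List (List (String × String))) (d l : Bool) (fs ms : String) :
    fields.foldl (fun (st : Bool × Bool × String × String) f =>
      let java_type := getJavaType (fieldGet f "nature")
      let field_id := fieldGet f "id"
      let camel := to_camel_case field_id
      ((if java_type == "Date" then true else st.1),
       (if java_type == "List<String>" then true else st.2.1),
       st.2.2.1 ++ privLine java_type field_id,
       st.2.2.2 ++ methLines java_type field_id camel)) (d, l, fs, ms)
    = (d || fields.any (fun f => getJavaType (fieldGet f "nature") == "Date"),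
       l || fields.any (fun f => getJavaType (fieldGet f "nature") == "List<String>"),
       fields.foldl (fun acc f => acc ++ privLine (getJavaType (fieldGet f "nature")) (fieldGet f "id")) fs,
       fields.foldl (fun acc f =>
         let java_type := getJavaType (fieldGet f "nature")
         let field_id := fieldGet f "id"
         let camel := to_camel_case field_id
         acc ++ methLines java_type field_id camel) ms) := by
  induction fields generalizing d l fs ms with
  | nil => simp
  | cons f t ih =>
    simp only [List.foldl_cons, List.any_cons, ih, Prod.mk.injEq]
    refine ⟨?_, ?_, trivial⟩
    · cases hd : (getJavaType (fieldGet f "nature") == "Date") <;> cases d <;> simp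
    · cases hl : (getJavaType (fieldGet f "nature") == "List<String>") <;> cases l <;> simp

-- the interface package can never collide with java.util.Date / java.util.List
theorem ip_ne (function_id : String) (s : String) (hs : s.toList.head? = some 'j') :
    ("com.linedata.chorus.std.entity." ++ function_id ++ "IRAP." ++ (function_id ++ "IRAP")) ≠ s := by
  intro h
  have h2 := congrArg String.toList h
  rw [String.toList_append, String.toList_append, String.toList_append] at h2
  have h3 := congrArg List.head? h2
  rw [hs] at h3
  have hc : ("com.linedata.chorus.std.entity." : String).toList
      = 'c' :: "om.linedata.chorus.std.entity.".toList := by decide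
  rw [hc] at h3
  simp at h3

-- A's set of imports, reduced to B's plain list
theorem imports_eq (function_id : String) (d l : Bool) :
    (if l then
        PySem.Set.add (if d then
            PySem.Set.add (PySem.Set.ofList
              ["com.linedata.chorus.std.entity." ++ function_id ++ "IRAP." ++ (function_id ++ "IRAP")])
              "java.util.Date"
          else PySem.Set.ofList
              ["com.linedata.chorus.std.entity." ++ function_id ++ "IRAP." ++ (function_id ++ "IRAP")])
          "java.util.List"
      else (if d then
            PySem.Set.add (PySem.Set.ofList
              ["com.linedata.chorus.std.entity." ++ function_id ++ "IRAP." ++ (function_id ++ "IRAP")])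
              "java.util.Date"
          else PySem.Set.ofList
              ["com.linedata.chorus.std.entity." ++ function_id ++ "IRAP." ++ (function_id ++ "IRAP")]))
    = ["com.linedata.chorus.std.entity." ++ function_id ++ "IRAP." ++ (function_id ++ "IRAP")] ++
      (if d then ["java.util.Date"] else []) ++ (if l then ["java.util.List"] else []) := by
  have hd := ip_ne function_id "java.util.Date" (by decide)
  have hl := ip_ne function_id "java.util.List" (by decide)
  have h0 : PySem.Set.ofList
      ["com.linedata.chorus.std.entity." ++ function_id ++ "IRAP." ++ (function_id ++ "IRAP")]
      = ["com.linedata.chorus.std.entity." ++ function_id ++ "IRAP." ++ (function_id ++ "IRAP")] :=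
    PySem.Set.ofList_eq_self_of_nodup _ (List.nodup_singleton _)
  have hD : PySem.Set.add
      ["com.linedata.chorus.std.entity." ++ function_id ++ "IRAP." ++ (function_id ++ "IRAP")]
      "java.util.Date"
      = ["com.linedata.chorus.std.entity." ++ function_id ++ "IRAP." ++ (function_id ++ "IRAP"),
         "java.util.Date"] := by
    rw [PySem.Set.add_of_not_mem (by simp; exact fun h => hd h.symm)]; simp
  have hL1 : PySem.Set.add
      ["com.linedata.chorus.std.entity." ++ function_id ++ "IRAP." ++ (function_id ++ "IRAP")]
      "java.util.List"
      = ["com.linedata.chorus.std.entity." ++ function_id ++ "IRAP." ++ (function_id ++ "IRAP"),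
         "java.util.List"] := by
    rw [PySem.Set.add_of_not_mem (by simp; exact fun h => hl h.symm)]; simp
  have hL2 : PySem.Set.add
      ["com.linedata.chorus.std.entity." ++ function_id ++ "IRAP." ++ (function_id ++ "IRAP"),
       "java.util.Date"] "java.util.List"
      = ["com.linedata.chorus.std.entity." ++ function_id ++ "IRAP." ++ (function_id ++ "IRAP"),
         "java.util.Date", "java.util.List"] := by
    rw [PySem.Set.add_of_not_mem (by simp; exact fun h => hl h.symm)]; simp
  cases d <;> cases l <;> simp [h0, hD, hL1, hL2]

-- ===== VERDICT (by name: the statement is the Claim_ definition above) =====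
theorem generate_java_class_spec : Claim_equal_generate_java_class := by
  intro function_id fields _ _
  unfold Spec_generate_java_class generate_java_class generate_java_class_alt
  rw [combined_fold]
  simp only [Bool.false_or, imports_eq]
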